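-- pv_equiv track=rewrite | github.com/nadiiagut/ai-requirement-readiness-analyzer | src/api.py | _classify_issue_by_labels
-- ===== SOURCE A (Python) =====
-- from typing import Any, List, Optional, Union
--
-- def _classify_issue_by_labels(labels: List[str]) -> Optional[str]:
--     """
--     Classify issue readiness based on labels.
--
--     Returns: 'ready', 'needs_review', 'needs_refinement', or None if no relevant label.
--     """
--     labels_lower = [l.lower().replace("_", "-").replace(" ", "-") for l in labels]
--
--     if any(l in ["ready-for-sprint", "ready", "sprint-ready", "dev-ready"] for l in labels_lower):
--         return "ready"
--     if any(l in ["needs-review", "review", "needs-qa-review"] for l in labels_lower):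
--         return "needs_review"
--     if any(l in ["needs-refinement", "refinement", "needs-grooming", "backlog"] for l in labels_lower):
--         return "needs_refinement"
--     return None
-- ===== SOURCE B (Python) =====
-- from typing import List, Optional
--
-- _LABEL_CATEGORY = {
--     "ready-for-sprint": "ready",
--     "ready": "ready",
--     "sprint-ready": "ready",
--     "dev-ready": "ready",
--     "needs-review": "needs_review",
--     "review": "needs_review",
--     "needs-qa-review": "needs_review",
--     "needs-refinement": "needs_refinement",
--     "refinement": "needs_refinement",
--     "needs-grooming": "needs_refinement",
--     "backlog": "needs_refinement",
-- }
--
-- def _classify_issue_by_labels(labels: List[str]) -> Optional[str]: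
--     found = set()
--     for l in labels:
--         cat = _LABEL_CATEGORY.get(l.lower().replace("_", "-").replace(" ", "-"))
--         if cat is not None:
--             found.add(cat)
--     for cat in ("ready", "needs_review", "needs_refinement"):
--         if cat in found:
--             return cat
--     return None
-- ===== Notes on version B (the rewrite author's own statement) =====
-- stated objective: idiomatic
-- what changed: Replaced the three priority-ordered any() scans over the normalized labels with one label-to-category dict, a single pass collecting matched categories into a set, and a selection of the first category in priority order.
import Mathlib
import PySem

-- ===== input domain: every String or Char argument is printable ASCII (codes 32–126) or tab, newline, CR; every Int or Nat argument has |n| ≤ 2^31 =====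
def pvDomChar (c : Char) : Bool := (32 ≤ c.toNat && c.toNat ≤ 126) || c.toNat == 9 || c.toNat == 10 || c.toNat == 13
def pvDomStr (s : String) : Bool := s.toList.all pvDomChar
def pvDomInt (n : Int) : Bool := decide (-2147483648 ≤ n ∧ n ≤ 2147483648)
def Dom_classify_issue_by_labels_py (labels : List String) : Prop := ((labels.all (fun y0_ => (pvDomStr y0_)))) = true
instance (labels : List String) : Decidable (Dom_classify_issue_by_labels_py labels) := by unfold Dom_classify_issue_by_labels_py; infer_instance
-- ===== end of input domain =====

-- B replaces A's three priority-ordered any() scans with one label→category table,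
-- a single collecting pass into a set, and a priority-order selection (idiomatic rewrite, not claimed faster).

-- shared normalization used by both Pythons: l.lower().replace("_", "-").replace(" ", "-")
def pvNormLabel (l : String) : String :=
  PySem.Str.replace (PySem.Str.replace (PySem.Str.lower l) "_" "-") " " "-"

-- ===== PORT A =====
def classify_issue_by_labels_py (labels : List String) : Option String :=
  let labels_lower := labels.map pvNormLabel
  if labels_lower.any (fun l => (["ready-for-sprint", "ready", "sprint-ready", "dev-ready"] : List String).contains l) then
    some "ready"
  else if labels_lower.any (fun l => (["needs-review", "review", "needs-qa-review"] : List String).contains l) then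
    some "needs_review"
  else if labels_lower.any (fun l => (["needs-refinement", "refinement", "needs-grooming", "backlog"] : List String).contains l) then
    some "needs_refinement"
  else
    none

-- ===== PORT B =====
def pvLabelCategory : PySem.Dict String String := PySem.Dict.ofList
  [("ready-for-sprint", "ready"), ("ready", "ready"), ("sprint-ready", "ready"), ("dev-ready", "ready"),
     ("needs-review", "needs_review"), ("review", "needs_review"), ("needs-qa-review", "needs_review"),
     ("needs-refinement", "needs_refinement"), ("refinement", "needs_refinement"),
     ("needs-grooming", "needs_refinement"), ("backlog", "needs_refinement")]

def classify_issue_by_labels_py_alt (labels : List String) : Option String :=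
  let found : PySem.Set String := labels.foldl (fun acc l =>
    match pvLabelCategory.get? (pvNormLabel l) with
    | some cat => PySem.Set.add acc cat
    | none => acc) PySem.Set.empty
  (["ready", "needs_review", "needs_refinement"] : List String).find?
    (fun c => PySem.Set.contains found c)

-- ===== PRECONDITION & SPEC =====
def Spec_classify_issue_by_labels_py (labels : List String) (out : Option String) : Prop := out = classify_issue_by_labels_py_alt labels
instance (labels : List String) (out : Option String) : Decidable (Spec_classify_issue_by_labels_py labels out) := by unfold Spec_classify_issue_by_labels_py; infer_instance

-- ===== CLAIM (what is proved, stated in full; the proofs are below) =====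
def Claim_equal_classify_issue_by_labels_py : Prop := ∀ (labels : List String), Dom_classify_issue_by_labels_py labels → Spec_classify_issue_by_labels_py labels (classify_issue_by_labels_py labels)

-- ===== LEMMAS AND PROOFS =====

theorem contains_add (s : PySem.Set String) (x c : String) :
    (PySem.Set.add s x).contains c = (PySem.Set.contains s c || (x == c)) := by
  simp only [PySem.Set.add, PySem.Set.contains]
  by_cases hm : List.contains s x <;> by_cases hc : x = c <;>
    simp_all;  simp [Ne.symm hc];  exact fun h => absurd h hc

-- membership in B's foldl-built set of matched categories, generalized over the accumulator
theorem contains_fold (labels : List String) (acc : PySem.Set String) (c : String) :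
    PySem.Set.contains
      (labels.foldl (fun acc l =>
        match pvLabelCategory.get? (pvNormLabel l) with
        | some cat => PySem.Set.add acc cat
        | none => acc) acc) c
      = (PySem.Set.contains acc c ||
         labels.any (fun l => pvLabelCategory.get? (pvNormLabel l) == some c)) := by
  induction labels generalizing acc with
  | nil => simp
  | cons x xs ih =>
    rw [List.foldl_cons, List.any_cons]
    cases h : pvLabelCategory.get? (pvNormLabel x) with
    | none => rw [ih]; simp
    | some cat =>
      rw [ih, contains_add]
      simp [Bool.or_assoc, Bool.or_comm, Bool.or_left_comm]

-- the literal dict, with the update-loop of ofList evaluated away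
theorem pvLabelCategory_eq_mk : pvLabelCategory = PySem.Dict.mk
    [("ready-for-sprint", "ready"), ("ready", "ready"), ("sprint-ready", "ready"), ("dev-ready", "ready"),
     ("needs-review", "needs_review"), ("review", "needs_review"), ("needs-qa-review", "needs_review"),
     ("needs-refinement", "needs_refinement"), ("refinement", "needs_refinement"),
     ("needs-grooming", "needs_refinement"), ("backlog", "needs_refinement")] := by decide

-- per-string characterization of the table lookup, one lemma per category

set_option maxHeartbeats 2000000 in
theorem lookup_ready (s : String) :
    (pvLabelCategory.get? s == some "ready") =
      (["ready-for-sprint", "ready", "sprint-ready", "dev-ready"] : List String).contains s := by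
  rw [pvLabelCategory_eq_mk]
  simp only [PySem.Dict.get?_mk_cons]
  split_ifs <;> (simp_all [PySem.Dict.get?]; try (first
    | (rename_i h; subst h; decide)
    | (and_intros <;> (intro h; subst h; simp_all))))


set_option maxHeartbeats 2000000 in
theorem lookup_review (s : String) :
    (pvLabelCategory.get? s == some "needs_review") =
      (["needs-review", "review", "needs-qa-review"] : List String).contains s := by
  rw [pvLabelCategory_eq_mk]
  simp only [PySem.Dict.get?_mk_cons]
  split_ifs <;> (simp_all [PySem.Dict.get?]; try (first
    | (rename_i h; subst h; decide)
    | (and_intros <;> (intro h; subst h; simp_all))))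


set_option maxHeartbeats 2000000 in
theorem lookup_refinement (s : String) :
    (pvLabelCategory.get? s == some "needs_refinement") =
      (["needs-refinement", "refinement", "needs-grooming", "backlog"] : List String).contains s := by
  rw [pvLabelCategory_eq_mk]
  simp only [PySem.Dict.get?_mk_cons]
  split_ifs <;> (simp_all [PySem.Dict.get?]; try (first
    | (rename_i h; subst h; decide)
    | (and_intros <;> (intro h; subst h; simp_all))))


-- ===== VERDICT (by name: the statement is the Claim_ definition above) =====
theorem classify_issue_by_labels_py_spec : Claim_equal_classify_issue_by_labels_py := by
  intro labels _
  show classify_issue_by_labels_py labels = classify_issue_by_labels_py_alt labels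
  unfold classify_issue_by_labels_py classify_issue_by_labels_py_alt
  simp only [List.find?, contains_fold, lookup_ready, lookup_review, lookup_refinement,
    List.any_map, Function.comp_def]
  simp only [show ∀ c : String, PySem.Set.contains PySem.Set.empty c = false from fun _ => rfl,
    Bool.false_or]
  have key : ∀ b1 b2 b3 : Bool,
      (if b1 = true then some "ready"
       else if b2 = true then some "needs_review"
       else if b3 = true then some "needs_refinement"
       else (none : Option String))
      = (match b1 with
         | true => some "ready"
         | false => match b2 with
           | true => some "needs_review"
           | false => match b3 with
             | true => some "needs_refinement"
             | false => none) := by decide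
  exact key _ _ _
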